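-- pv_equiv track=rewrite | github.com/aidengindin/advent_of_code_2024 | day18/part2.py | search
-- ===== SOURCE A (Python) =====
-- import heapq
--
-- SIZE = 70
--
-- class PriorityQueue:
--     def __init__(self):
--         self._queue = []
--
--     def push(self, element, priority):
--         heapq.heappush(self._queue, (priority, element))
--
--     def pop(self):
--         return heapq.heappop(self._queue)[1]
--
--     def empty(self):
--         return len(self._queue) == 0
--
-- def adjacent(tile, corrupt_tiles):
--     x, y = tile
--     return {tup for tup in {(x - 1, y), (x + 1, y), (x, y - 1), (x, y + 1)} if in_memory(tup) and tup not in corrupt_tiles}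
--
-- def in_memory(tile):
--     x, y = tile
--     return x >= 0 and x <= SIZE and y >= 0 and y <= SIZE
--
-- def manhattan_distance(tile1, tile2):
--     x1, y1 = tile1
--     x2, y2 = tile2
--     return abs(x1 - x2) + abs(y1 - y2)
--
-- def search(corrupt_tiles, start, end):
--     heuristic = lambda tile: manhattan_distance(tile, end)
--     frontier = PriorityQueue()
--     frontier.push(start, heuristic(start))
--     came_from = {start: None}
--     cost_so_far = {start: 0}
--
--     while not frontier.empty():
--         current = frontier.pop()
--         # visualize(corrupt_tiles, frontier, current)
--         if current == end:
--             break
--         for next in adjacent(current, corrupt_tiles):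
--             new_cost = cost_so_far[current] + 1
--             if next not in cost_so_far or new_cost < cost_so_far[next]:
--                 cost_so_far[next] = new_cost
--                 priority = new_cost + heuristic(next)
--                 frontier.push(next, priority)
--                 came_from[next] = current
--
--     return end in cost_so_far
-- ===== SOURCE B (Python) =====
-- SIZE = 70
--
-- def in_memory(tile):
--     x, y = tile
--     return 0 <= x <= SIZE and 0 <= y <= SIZE
--
-- def adjacent(tile, corrupt_tiles):
--     x, y = tile
--     return {tup for tup in {(x - 1, y), (x + 1, y), (x, y - 1), (x, y + 1)}
--             if in_memory(tup) and tup not in corrupt_tiles}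
--
-- def search(corrupt_tiles, start, end):
--     corrupt = set(corrupt_tiles)
--     visited = {start}
--     queue = [start]
--     i = 0
--     while i < len(queue):
--         current = queue[i]
--         i += 1
--         for nxt in adjacent(current, corrupt):
--             if nxt not in visited:
--                 visited.add(nxt)
--                 queue.append(nxt)
--     return end in visited
-- ===== Notes on version B (the rewrite author's own statement) =====
-- stated objective: simpler
-- what changed: Replaces the A* search (priority queue, Manhattan heuristic, cost_so_far relaxation) by a plain BFS flood fill over a visited set, with the corrupt tiles hashed into a set once; only reachability of end is returned, which is order-independent.
import Mathlib
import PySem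

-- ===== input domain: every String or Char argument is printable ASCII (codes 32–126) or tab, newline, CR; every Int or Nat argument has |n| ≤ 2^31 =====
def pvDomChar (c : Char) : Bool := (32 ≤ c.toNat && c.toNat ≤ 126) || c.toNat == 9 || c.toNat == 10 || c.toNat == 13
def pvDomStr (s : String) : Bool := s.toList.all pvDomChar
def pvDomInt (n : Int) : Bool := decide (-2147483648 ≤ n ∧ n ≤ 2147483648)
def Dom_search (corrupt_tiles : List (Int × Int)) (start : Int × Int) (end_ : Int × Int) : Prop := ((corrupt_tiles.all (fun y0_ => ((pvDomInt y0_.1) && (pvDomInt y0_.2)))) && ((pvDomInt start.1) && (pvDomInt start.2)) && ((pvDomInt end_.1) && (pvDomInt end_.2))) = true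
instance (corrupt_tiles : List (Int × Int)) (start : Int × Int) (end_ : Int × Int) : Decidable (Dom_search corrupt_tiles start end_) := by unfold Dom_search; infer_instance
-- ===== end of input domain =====

-- B replaces A's A* search by a plain BFS flood fill (objective: simpler — no priority
-- queue/heuristic/relaxation, corrupt tiles hashed once); both return whether `end_`
-- is reachable from `start`.

-- ===== PORT A =====
-- A* ported step for step.  Python's set-valued `adjacent` is modelled as the filtered
-- list of the four (pairwise distinct) neighbour candidates; the value returned by
-- `search` does not depend on the iteration order of that set.  The invariant argument
-- `AInv` and the potential `costPot` only serve termination of the Python while-loop.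
def inMemory (t : Int × Int) : Bool :=
  decide (0 ≤ t.1) && decide (t.1 ≤ 70) && decide (0 ≤ t.2) && decide (t.2 ≤ 70)

def adjacent (t : Int × Int) (corrupt : List (Int × Int)) : List (Int × Int) :=
  [(t.1 - 1, t.2), (t.1 + 1, t.2), (t.1, t.2 - 1), (t.1, t.2 + 1)].filter
    (fun p => inMemory p && !(corrupt.contains p))

def manhattan (a b : Int × Int) : Int := |a.1 - b.1| + |a.2 - b.2|

-- heapq on (priority, element) tuples: heappop removes the lexicographically least tuple
def entryLt (a b : Int × (Int × Int)) : Bool :=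
  decide (a.1 < b.1) ||
    (a.1 == b.1 && (decide (a.2.1 < b.2.1) || (a.2.1 == b.2.1 && decide (a.2.2 < b.2.2))))

def heapMin (e : Int × (Int × Int)) (q : List (Int × (Int × Int))) : Int × (Int × Int) :=
  q.foldl (fun m x => if entryLt x m then x else m) e

-- state of the while-loop: (cost_so_far, frontier, came_from)
abbrev AState := PySem.Dict (Int × Int) Int × List (Int × (Int × Int)) × PySem.Dict (Int × Int) (Option (Int × Int))

-- body of `for next in adjacent(current, corrupt_tiles): ...`
def relaxStep (end_ current : Int × Int) (s : AState) (nxt : Int × Int) : AState :=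
  let new_cost := s.1.getD current 0 + 1   -- cost_so_far[current]: current is always a key
  if !(s.1.contains nxt) || decide (new_cost < s.1.getD nxt 0) then
    (s.1.insert nxt new_cost,
     s.2.1 ++ [(new_cost + manhattan nxt end_, nxt)],
     s.2.2.insert nxt (some current))
  else s

-- termination machinery ---------------------------------------------------------
def gridTiles : List (Int × Int) :=
  (List.range 71).flatMap (fun x => (List.range 71).map (fun y => (Int.ofNat x, Int.ofNat y)))

def costPot (start : Int × Int) (cost : PySem.Dict (Int × Int) Int) : Nat :=
  ((start :: gridTiles).map (fun v => (cost.getD v 5043).toNat)).sum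

def CInv (start : Int × Int) (cost : PySem.Dict (Int × Int) Int) : Prop :=
  cost.keys.Nodup ∧ (∀ k ∈ cost.keys, k = start ∨ inMemory k = true) ∧
  (∀ k v, cost.get? k = some v → 0 ≤ v ∧ v + 1 ≤ (cost.size : Int))

def AInv (start : Int × Int) (q : List (Int × (Int × Int)))
    (cost : PySem.Dict (Int × Int) Int) : Prop :=
  CInv start cost ∧ ∀ e ∈ q, cost.contains e.2 = true

-- generic helpers used by the termination arguments of both while-loops
lemma pvSum_map_lt {l : List (Int × Int)} {f g : (Int × Int) → Nat}
    (h : ∀ x ∈ l, f x ≤ g x) {x} (hx : x ∈ l) (hlt : f x < g x) :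
    (l.map f).sum < (l.map g).sum := by
  induction l with
  | nil => simp at hx
  | cons a t ih =>
    simp only [List.map_cons, List.sum_cons]
    rcases List.mem_cons.mp hx with rfl | hx'
    · have h2 : (t.map f).sum ≤ (t.map g).sum :=
        List.sum_le_sum (fun y hy => h y (List.mem_cons_of_mem _ hy))
      omega
    · have h1 : f a ≤ g a := h a List.mem_cons_self
      have h2 := ih (fun y hy => h y (List.mem_cons_of_mem _ hy)) hx'
      omega

lemma pvNodup_length_le {l₁ l₂ : List (Int × Int)} (h : l₁.Nodup) (hs : l₁ ⊆ l₂) :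
    l₁.length ≤ l₂.length := by
  classical
  calc l₁.length = l₁.toFinset.card := (List.toFinset_card_of_nodup h).symm
    _ ≤ l₂.toFinset.card := Finset.card_le_card (by intro x hx; simp at hx ⊢; exact hs hx)
    _ ≤ l₂.length := l₂.toFinset_card_le

lemma heapMin_mem (e : Int × (Int × Int)) (q : List (Int × (Int × Int))) :
    heapMin e q ∈ e :: q := by
  induction q generalizing e with
  | nil => simp [heapMin]
  | cons x t ih =>
    simp only [heapMin, List.foldl_cons] at *
    have H := ih (if entryLt x e then x else e)
    rcases List.mem_cons.mp H with h | h
    · rw [h]; split_ifs with hx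
      · exact List.mem_cons_of_mem _ List.mem_cons_self
      · exact List.mem_cons_self
    · exact List.mem_cons_of_mem _ (List.mem_cons_of_mem _ h)

lemma mem_gridTiles (k : Int × Int) : k ∈ gridTiles ↔ inMemory k = true := by
  constructor
  · intro h
    obtain ⟨x, hx, h2⟩ := List.mem_flatMap.mp h
    obtain ⟨y, hy, h3⟩ := List.mem_map.mp h2
    rw [List.mem_range] at hx hy
    rw [← h3]
    simp only [inMemory, Bool.and_eq_true, decide_eq_true_eq]
    refine ⟨⟨⟨?_, ?_⟩, ?_⟩, ?_⟩ <;> simp <;> omega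
  · intro h
    simp only [inMemory, Bool.and_eq_true, decide_eq_true_eq] at h
    refine List.mem_flatMap.mpr ⟨k.1.toNat, List.mem_range.mpr (by omega),
      List.mem_map.mpr ⟨k.2.toNat, List.mem_range.mpr (by omega), ?_⟩⟩
    rw [Prod.ext_iff]
    constructor <;> simp <;> omega

lemma gridTiles_length : gridTiles.length = 5041 := by
  simp [gridTiles, List.length_flatMap]

lemma cinv_size_le (start : Int × Int) (cost : PySem.Dict (Int × Int) Int)
    (hC : CInv start cost) : (cost.size : Int) ≤ 5042 := by
  have hkeys : cost.keys.length ≤ 5042 := by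
    have := pvNodup_length_le hC.1 (l₂ := start :: gridTiles)
      (by intro k hk
          rcases hC.2.1 k hk with h | h
          · rw [h]; exact List.mem_cons_self
          · exact List.mem_cons_of_mem _ ((mem_gridTiles k).mpr h))
    simpa [gridTiles_length] using this
  have hsz : cost.size = cost.keys.length := by
    simp [PySem.Dict.size, PySem.Dict.keys]
  omega

lemma relaxStep_spec (start end_ current nxt : Int × Int) (s : AState)
    (hn : inMemory nxt = true) (hC : CInv start s.1)
    (hcur : s.1.contains current = true)
    (hfr : ∀ e ∈ s.2.1, s.1.contains e.2 = true) :
    CInv start (relaxStep end_ current s nxt).1 ∧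
    (∀ e ∈ (relaxStep end_ current s nxt).2.1,
        (relaxStep end_ current s nxt).1.contains e.2 = true) ∧
    (relaxStep end_ current s nxt).1.contains current = true ∧
    (relaxStep end_ current s nxt = s ∨
      costPot start (relaxStep end_ current s nxt).1 < costPot start s.1) := by
  obtain ⟨vc, hvc⟩ : ∃ v, s.1.get? current = some v := by
    have h1 := PySem.Dict.contains_eq_isSome_get? s.1 current
    rw [hcur] at h1; exact Option.isSome_iff_exists.mp h1.symm
  have hvcD : s.1.getD current 0 = vc := PySem.Dict.getD_of_get?_eq_some _ 0 hvc
  obtain ⟨hvc0, hvc1⟩ := hC.2.2 current vc hvc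
  have hsize := cinv_size_le start s.1 hC
  by_cases hpush :
      (!(s.1.contains nxt) || decide (s.1.getD current 0 + 1 < s.1.getD nxt 0)) = true
  case neg =>
    have hid : relaxStep end_ current s nxt = s := by
      simp only [relaxStep]; rw [if_neg hpush]
    rw [hid]; exact ⟨hC, hfr, hcur, Or.inl rfl⟩
  case pos =>
  have hr : relaxStep end_ current s nxt =
      (s.1.insert nxt (s.1.getD current 0 + 1),
       s.2.1 ++ [(s.1.getD current 0 + 1 + manhattan nxt end_, nxt)],
       s.2.2.insert nxt (some current)) := by
    simp only [relaxStep]; rw [if_pos hpush]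
  have hold : s.1.contains nxt = true →
      ∃ vn, s.1.get? nxt = some vn ∧ vc + 1 < vn ∧ vn + 1 ≤ (s.1.size : Int) := by
    intro hc
    obtain ⟨vn, hvn⟩ : ∃ v, s.1.get? nxt = some v := by
      have h1 := PySem.Dict.contains_eq_isSome_get? s.1 nxt
      rw [hc] at h1; exact Option.isSome_iff_exists.mp h1.symm
    refine ⟨vn, hvn, ?_, (hC.2.2 nxt vn hvn).2⟩
    rcases Bool.or_eq_true_iff.mp hpush with h | h
    · rw [hc] at h; simp at h
    · have h2 := of_decide_eq_true h
      rwa [hvcD, PySem.Dict.getD_of_get?_eq_some _ 0 hvn] at h2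
  rw [hr]
  refine ⟨⟨PySem.Dict.nodup_keys_insert _ _ _ hC.1, ?_, ?_⟩, ?_, ?_, Or.inr ?_⟩
  · intro k hk
    rcases (PySem.Dict.mem_keys_insert _ _ _ _).mp hk with rfl | hk'
    · right; exact hn
    · exact hC.2.1 k hk'
  · intro k v hkv
    rw [PySem.Dict.get?_insert] at hkv
    rw [PySem.Dict.size_insert]
    split_ifs at hkv with hk
    · injection hkv with h'
      rw [← h', hvcD]
      by_cases hc : s.1.contains nxt = true
      · obtain ⟨vn, hvn, hlt, hub⟩ := hold hc
        rw [if_pos hc]; exact ⟨by omega, by omega⟩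
      · rw [if_neg hc]; push_cast; omega
    · obtain ⟨h0, h1⟩ := hC.2.2 k v hkv
      split_ifs with hc
      · exact ⟨h0, h1⟩
      · refine ⟨h0, ?_⟩; push_cast; omega
  · intro e he
    rcases List.mem_append.mp he with h | h
    · rw [PySem.Dict.contains_insert, hfr e h]; simp
    · simp only [List.mem_singleton] at h
      rw [h]
      exact PySem.Dict.contains_insert_self _ _ _
  · rw [PySem.Dict.contains_insert, hcur]; simp
  · have hmem : nxt ∈ start :: gridTiles :=
      List.mem_cons_of_mem _ ((mem_gridTiles nxt).mpr hn)
    apply pvSum_map_lt _ hmem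
    · rw [PySem.Dict.getD_insert]
      simp only [↓reduceIte]
      by_cases hc : s.1.contains nxt = true
      · obtain ⟨vn, hvn, hlt, _⟩ := hold hc
        rw [PySem.Dict.getD_of_get?_eq_some _ 5043 hvn, hvcD]; omega
      · rw [PySem.Dict.getD_of_not_contains _ 5043 (by simpa using hc), hvcD]; omega
    · intro v hv
      rw [PySem.Dict.getD_insert]
      split_ifs with hveq
      · subst hveq
        by_cases hc : s.1.contains v = true
        · obtain ⟨vn, hvn, hlt, _⟩ := hold hc
          rw [PySem.Dict.getD_of_get?_eq_some _ 5043 hvn, hvcD]; omega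
        · rw [PySem.Dict.getD_of_not_contains _ 5043 (by simpa using hc), hvcD]; omega
      · exact le_refl _

lemma relaxFold_term (start end_ current : Int × Int) (l : List (Int × Int))
    (hl : ∀ n ∈ l, inMemory n = true) (s : AState)
    (hC : CInv start s.1) (hcur : s.1.contains current = true)
    (hfr : ∀ e ∈ s.2.1, s.1.contains e.2 = true) :
    CInv start (l.foldl (relaxStep end_ current) s).1 ∧
    (∀ e ∈ (l.foldl (relaxStep end_ current) s).2.1,
        (l.foldl (relaxStep end_ current) s).1.contains e.2 = true) ∧
    (l.foldl (relaxStep end_ current) s).1.contains current = true ∧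
    (l.foldl (relaxStep end_ current) s = s ∨
      costPot start (l.foldl (relaxStep end_ current) s).1 < costPot start s.1) := by
  induction l generalizing s with
  | nil => exact ⟨hC, hfr, hcur, Or.inl rfl⟩
  | cons n t ih =>
    have S := relaxStep_spec start end_ current n s (hl n List.mem_cons_self) hC hcur hfr
    have IH := ih (fun x hx => hl x (List.mem_cons_of_mem _ hx))
      (relaxStep end_ current s n) S.1 S.2.2.1 S.2.1
    simp only [List.foldl_cons]
    refine ⟨IH.1, IH.2.1, IH.2.2.1, ?_⟩
    rcases S.2.2.2 with hS | hS
    · rw [hS] at IH ⊢; exact IH.2.2.2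
    · rcases IH.2.2.2 with hI | hI
      · rw [hI]; exact Or.inr hS
      · exact Or.inr (lt_trans hI hS)

lemma ainv_init (start end_ : Int × Int) :
    AInv start [(manhattan start end_, start)] (PySem.Dict.empty.insert start 0) := by
  refine ⟨⟨?_, ?_, ?_⟩, ?_⟩
  · exact PySem.Dict.nodup_keys_insert _ _ _ (by simp [PySem.Dict.keys, PySem.Dict.empty])
  · intro k hk
    rcases (PySem.Dict.mem_keys_insert _ _ _ _).mp hk with rfl | hk'
    · exact Or.inl rfl
    · simp [PySem.Dict.keys, PySem.Dict.empty] at hk'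
  · intro k v hkv
    rw [PySem.Dict.get?_insert] at hkv
    split_ifs at hkv with hk
    · injection hkv with h'
      have hsz : (PySem.Dict.empty.insert start (0 : Int)).size = 1 := by
        simp [PySem.Dict.size_insert, PySem.Dict.contains_empty, PySem.Dict.size_empty]
      rw [hsz]; omega
    · rw [PySem.Dict.get?_empty] at hkv; exact absurd hkv (by simp)
  · intro e he
    simp only [List.mem_singleton] at he
    rw [he]
    exact PySem.Dict.contains_insert_self _ _ _

-- the while-loop of `search`
def aloop (corrupt : List (Int × Int)) (start end_ : Int × Int)
    (q : List (Int × (Int × Int))) (cost : PySem.Dict (Int × Int) Int)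
    (came : PySem.Dict (Int × Int) (Option (Int × Int)))
    (h : AInv start q cost) : PySem.Dict (Int × Int) Int :=
  match q with
  | [] => cost
  | e :: rest =>
    let m := heapMin e rest
    let q' := (e :: rest).erase m
    if m.2 = end_ then cost
    else
      let r := (adjacent m.2 corrupt).foldl (relaxStep end_ m.2) (cost, q', came)
      aloop corrupt start end_ r.2.1 r.1 r.2.2
        (by
          have H := relaxFold_term start end_ m.2 (adjacent m.2 corrupt)
            (by intro n hn; simp [adjacent, List.mem_filter] at hn; exact hn.2.1)
            (cost, q', came) h.1
            (h.2 m (heapMin_mem e rest))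
            (by intro e' he'; exact h.2 e' (List.erase_subset he'))
          exact ⟨H.1, H.2.1⟩)
termination_by (costPot start cost, q.length)
decreasing_by
  have H := relaxFold_term start end_ m.2 (adjacent m.2 corrupt)
    (by intro n hn; simp [adjacent, List.mem_filter] at hn; exact hn.2.1)
    (cost, q', came) h.1
    (h.2 m (heapMin_mem e rest))
    (by intro e' he'; exact h.2 e' (List.erase_subset he'))
  have hql : q'.length < (e :: rest).length := by
    have hm := heapMin_mem e rest
    have := List.length_erase_of_mem hm
    simp only [q']
    rw [this]
    simp
  rcases H.2.2.2 with hid | hlt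
  · rw [hid]
    exact Prod.Lex.right _ hql
  · exact Prod.Lex.left _ _ hlt

def search (corrupt_tiles : List (Int × Int)) (start : Int × Int) (end_ : Int × Int) : Bool :=
  (aloop corrupt_tiles start end_ [(manhattan start end_, start)]
    (PySem.Dict.empty.insert start 0)
    (PySem.Dict.empty.insert start none)
    (ainv_init start end_)).contains end_

-- ===== PORT B =====
-- BFS flood fill, ported step for step from Source B; the growing Python list with index
-- pointer i is modelled as the list of not-yet-processed queue elements `pending`.
-- The invariant argument `BInv` only serves termination of the while-loop.

-- body of `for nxt in adjacent(current, corrupt): ...`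
def bfsStep (s : PySem.Set (Int × Int) × List (Int × Int)) (nxt : Int × Int) :
    PySem.Set (Int × Int) × List (Int × Int) :=
  if PySem.Set.contains s.1 nxt then s else (PySem.Set.add s.1 nxt, s.2 ++ [nxt])

def BInv (start : Int × Int) (visited : PySem.Set (Int × Int))
    (pending : List (Int × Int)) : Prop :=
  visited.Nodup ∧ (∀ v ∈ visited, v = start ∨ inMemory v = true) ∧
  ∀ p ∈ pending, p ∈ visited

lemma bfsStep_spec (start nxt : Int × Int) (hn : inMemory nxt = true)
    (s : PySem.Set (Int × Int) × List (Int × Int))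
    (hN : s.1.Nodup) (hS : ∀ v ∈ s.1, v = start ∨ inMemory v = true)
    (hP : ∀ p ∈ s.2, p ∈ s.1) :
    (bfsStep s nxt).1.Nodup ∧
    (∀ v ∈ (bfsStep s nxt).1, v = start ∨ inMemory v = true) ∧
    (∀ p ∈ (bfsStep s nxt).2, p ∈ (bfsStep s nxt).1) ∧
    (bfsStep s nxt = s ∨ s.1.length < (bfsStep s nxt).1.length) := by
  by_cases hc : PySem.Set.contains s.1 nxt = true
  · have hid : bfsStep s nxt = s := by simp only [bfsStep]; rw [if_pos hc]
    rw [hid]; exact ⟨hN, hS, hP, Or.inl rfl⟩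
  · have hnm : nxt ∉ s.1 := fun hm => hc ((PySem.Set.contains_iff _ _).mpr hm)
    have hr : bfsStep s nxt = (PySem.Set.add s.1 nxt, s.2 ++ [nxt]) := by
      simp only [bfsStep]; rw [if_neg hc]
    rw [hr]
    refine ⟨PySem.Set.nodup_add _ _ hN, ?_, ?_, Or.inr ?_⟩
    · intro v hv
      rcases (PySem.Set.mem_add _ _ _).mp hv with hv' | rfl
      · exact hS v hv'
      · exact Or.inr hn
    · intro p hp
      rcases List.mem_append.mp hp with hp' | hp'
      · exact (PySem.Set.mem_add _ _ _).mpr (Or.inl (hP p hp'))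
      · simp only [List.mem_singleton] at hp'
        exact (PySem.Set.mem_add _ _ _).mpr (Or.inr hp')
    · rw [PySem.Set.add_of_not_mem hnm]
      simp

lemma bfsFold_term (start : Int × Int) (l : List (Int × Int))
    (hl : ∀ n ∈ l, inMemory n = true)
    (s : PySem.Set (Int × Int) × List (Int × Int))
    (hN : s.1.Nodup) (hS : ∀ v ∈ s.1, v = start ∨ inMemory v = true)
    (hP : ∀ p ∈ s.2, p ∈ s.1) :
    (l.foldl bfsStep s).1.Nodup ∧
    (∀ v ∈ (l.foldl bfsStep s).1, v = start ∨ inMemory v = true) ∧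
    (∀ p ∈ (l.foldl bfsStep s).2, p ∈ (l.foldl bfsStep s).1) ∧
    (l.foldl bfsStep s = s ∨ s.1.length < (l.foldl bfsStep s).1.length) := by
  induction l generalizing s with
  | nil => exact ⟨hN, hS, hP, Or.inl rfl⟩
  | cons n t ih =>
    have S := bfsStep_spec start n (hl n List.mem_cons_self) s hN hS hP
    have IH := ih (fun x hx => hl x (List.mem_cons_of_mem _ hx))
      (bfsStep s n) S.1 S.2.1 S.2.2.1
    simp only [List.foldl_cons]
    refine ⟨IH.1, IH.2.1, IH.2.2.1, ?_⟩
    rcases S.2.2.2 with hS' | hS'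
    · rw [hS'] at IH ⊢; exact IH.2.2.2
    · rcases IH.2.2.2 with hI | hI
      · rw [hI]; exact Or.inr hS'
      · exact Or.inr (lt_trans hS' hI)

lemma visited_le (start : Int × Int) (visited : PySem.Set (Int × Int))
    (hN : visited.Nodup) (hS : ∀ v ∈ visited, v = start ∨ inMemory v = true) :
    visited.length ≤ 5042 := by
  have := pvNodup_length_le hN (l₂ := start :: gridTiles)
    (by intro k hk
        rcases hS k hk with h | h
        · rw [h]; exact List.mem_cons_self
        · exact List.mem_cons_of_mem _ ((mem_gridTiles k).mpr h))
  simpa [gridTiles_length] using this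

def bloop (corrupt : List (Int × Int)) (start : Int × Int)
    (pending : List (Int × Int)) (visited : PySem.Set (Int × Int))
    (h : BInv start visited pending) : PySem.Set (Int × Int) :=
  match pending with
  | [] => visited
  | c :: rest =>
    let r := (adjacent c corrupt).foldl bfsStep (visited, rest)
    bloop corrupt start r.2 r.1
      (by
        have H := bfsFold_term start (adjacent c corrupt)
          (by intro n hn; simp [adjacent, List.mem_filter] at hn; exact hn.2.1)
          (visited, rest) h.1 h.2.1 (by intro p hp; exact h.2.2 p (List.mem_cons_of_mem _ hp))
        exact ⟨H.1, H.2.1, H.2.2.1⟩)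
termination_by (5042 - visited.length, pending.length)
decreasing_by
  have H := bfsFold_term start (adjacent c corrupt)
    (by intro n hn; simp [adjacent, List.mem_filter] at hn; exact hn.2.1)
    (visited, rest) h.1 h.2.1 (by intro p hp; exact h.2.2 p (List.mem_cons_of_mem _ hp))
  rcases H.2.2.2 with hid | hlt
  · rw [hid]
    exact Prod.Lex.right _ (by simp)
  · have hle := visited_le start _ H.1 H.2.1
    have hlt' : visited.length <
        ((adjacent c corrupt).foldl bfsStep (visited, rest)).1.length := hlt
    exact Prod.Lex.left _ _ (by omega)

def search_alt (corrupt_tiles : List (Int × Int)) (start : Int × Int) (end_ : Int × Int) : Bool :=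
  PySem.Set.contains
    (bloop (PySem.Set.ofList corrupt_tiles) start [start] (PySem.Set.ofList [start])
      (by
        refine ⟨PySem.Set.nodup_ofList _, ?_, ?_⟩
        · intro v hv
          rw [PySem.Set.mem_ofList] at hv
          simp only [List.mem_singleton] at hv
          exact Or.inl hv
        · intro p hp
          simp only [List.mem_singleton] at hp
          rw [PySem.Set.mem_ofList]
          simp [hp]))
    end_

-- ===== PRECONDITION & SPEC =====
def Spec_search (corrupt_tiles : List (Int × Int)) (start : Int × Int) (end_ : Int × Int) (out : Bool) : Prop := out = search_alt corrupt_tiles start end_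
instance (corrupt_tiles : List (Int × Int)) (start : Int × Int) (end_ : Int × Int) (out : Bool) : Decidable (Spec_search corrupt_tiles start end_ out) := by unfold Spec_search; infer_instance

-- ===== CLAIM (what is proved, stated in full; the proofs are below) =====
def Claim_equal_search : Prop := ∀ (corrupt_tiles : List (Int × Int)) (start : Int × Int) (end_ : Int × Int), Dom_search corrupt_tiles start end_ → Spec_search corrupt_tiles start end_ (search corrupt_tiles start end_)

-- ===== LEMMAS AND PROOFS =====

-- Both programs return "end_ is reachable from start through non-corrupt in-grid tiles".
def Reach (corrupt : List (Int × Int)) (s t : Int × Int) : Prop :=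
  Relation.ReflTransGen (fun a b => b ∈ adjacent a corrupt) s t

-- fold facts about relaxStep used by the reachability proofs
lemma relaxFold_mono (end_ current : Int × Int) (l : List (Int × Int)) (s : AState)
    (k : Int × Int) (hk : s.1.contains k = true) :
    (l.foldl (relaxStep end_ current) s).1.contains k = true := by
  induction l generalizing s with
  | nil => exact hk
  | cons n t ih =>
    simp only [List.foldl_cons]
    apply ih
    simp only [relaxStep]
    split_ifs with hc
    · rw [PySem.Dict.contains_insert, hk]; simp
    · exact hk

lemma relaxFold_contains_src (end_ current : Int × Int) (l : List (Int × Int)) (s : AState)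
    (k : Int × Int) (hk : (l.foldl (relaxStep end_ current) s).1.contains k = true) :
    s.1.contains k = true ∨ k ∈ l := by
  induction l generalizing s with
  | nil => exact Or.inl hk
  | cons n t ih =>
    simp only [List.foldl_cons] at hk
    rcases ih _ hk with hstep | hmem
    · simp only [relaxStep] at hstep
      split_ifs at hstep with hc
      · rw [PySem.Dict.contains_insert] at hstep
        rcases Bool.or_eq_true_iff.mp hstep with h | h
        · exact Or.inr (by rw [eq_of_beq h]; exact List.mem_cons_self)
        · exact Or.inl h
      · exact Or.inl hstep
    · exact Or.inr (List.mem_cons_of_mem _ hmem)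

lemma relaxFold_cover (end_ current : Int × Int) (l : List (Int × Int)) (s : AState) :
    ∀ n ∈ l, (l.foldl (relaxStep end_ current) s).1.contains n = true := by
  induction l generalizing s with
  | nil => intro n hn; simp at hn
  | cons n t ih =>
    intro x hx
    simp only [List.foldl_cons]
    rcases List.mem_cons.mp hx with rfl | hx'
    · apply relaxFold_mono
      simp only [relaxStep]
      split_ifs with hc
      · exact PySem.Dict.contains_insert_self _ _ _
      · rcases Bool.not_eq_true _ ▸ hc with _
        have : s.1.contains x = true := by
          by_contra hno
          apply hc
          simp [Bool.not_eq_true] at hno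
          simp [hno]
        exact this
    · exact ih _ x hx'

lemma relaxFold_front_mono (end_ current : Int × Int) (l : List (Int × Int)) (s : AState)
    (e : Int × (Int × Int)) (he : e ∈ s.2.1) :
    e ∈ (l.foldl (relaxStep end_ current) s).2.1 := by
  induction l generalizing s with
  | nil => exact he
  | cons n t ih =>
    simp only [List.foldl_cons]
    apply ih
    simp only [relaxStep]
    split_ifs with hc
    · exact List.mem_append_left _ he
    · exact he

lemma relaxFold_new_has_entry (end_ current : Int × Int) (l : List (Int × Int)) (s : AState)
    (k : Int × Int) (hk : (l.foldl (relaxStep end_ current) s).1.contains k = true) :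
    s.1.contains k = true ∨ ∃ e ∈ (l.foldl (relaxStep end_ current) s).2.1, e.2 = k := by
  induction l generalizing s with
  | nil => exact Or.inl hk
  | cons n t ih =>
    simp only [List.foldl_cons] at hk ⊢
    rcases ih _ hk with hstep | hw
    · simp only [relaxStep] at hstep
      split_ifs at hstep with hc
      · rw [PySem.Dict.contains_insert] at hstep
        rcases Bool.or_eq_true_iff.mp hstep with h | h
        · refine Or.inr ⟨(s.1.getD current 0 + 1 + manhattan n end_, n), ?_, (eq_of_beq h).symm⟩
          apply relaxFold_front_mono
          simp only [relaxStep]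
          rw [if_pos hc]
          exact List.mem_append_right _ List.mem_cons_self
        · exact Or.inl h
      · exact Or.inl hstep
    · exact Or.inr hw

-- the A* loop returns exactly the tiles reachable from start (plus the early break,
-- which can only fire once end_ itself is a key)
lemma aloop_mono (corrupt : List (Int × Int)) (start end_ : Int × Int) :
    ∀ (q : List (Int × (Int × Int))) (cost : PySem.Dict (Int × Int) Int)
      (came : PySem.Dict (Int × Int) (Option (Int × Int))) (h : AInv start q cost)
      (k : Int × Int), cost.contains k = true →
      (aloop corrupt start end_ q cost came h).contains k = true := by
  intro q cost came h
  induction q, cost, came, h using aloop.induct (corrupt := corrupt) (start := start) (end_ := end_) with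
  | case1 cost came h _ =>
    intro k hk; rw [aloop]; exact hk
  | case2 cost came e rest h m hme _ =>
    intro k hk
    have hme' : (heapMin e rest).2 = end_ := hme
    rw [aloop]; rw [if_pos hme']; exact hk
  | case3 cost came e rest h m q' hne r _ ih =>
    intro k hk
    have hne' : ¬ (heapMin e rest).2 = end_ := hne
    rw [aloop]; rw [if_neg hne']
    exact ih k (relaxFold_mono _ _ _ _ _ hk)

lemma aloop_sound (corrupt : List (Int × Int)) (start end_ : Int × Int) :
    ∀ (q : List (Int × (Int × Int))) (cost : PySem.Dict (Int × Int) Int)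
      (came : PySem.Dict (Int × Int) (Option (Int × Int))) (h : AInv start q cost),
      (∀ k, cost.contains k = true → Reach corrupt start k) →
      ∀ k, (aloop corrupt start end_ q cost came h).contains k = true →
        Reach corrupt start k := by
  intro q cost came h
  induction q, cost, came, h using aloop.induct (corrupt := corrupt) (start := start) (end_ := end_) with
  | case1 cost came h _ =>
    intro hS k hk; rw [aloop] at hk; exact hS k hk
  | case2 cost came e rest h m hme _ =>
    intro hS k hk
    have hme' : (heapMin e rest).2 = end_ := hme
    rw [aloop] at hk; rw [if_pos hme'] at hk; exact hS k hk
  | case3 cost came e rest h m q' hne r _ ih =>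
    intro hS k hk
    have hne' : ¬ (heapMin e rest).2 = end_ := hne
    rw [aloop] at hk; rw [if_neg hne'] at hk
    refine ih ?_ k hk
    intro k2 hk2
    rcases relaxFold_contains_src _ _ _ _ _ hk2 with hold | hadj
    · exact hS k2 hold
    · have hm : cost.contains (heapMin e rest).2 = true := h.2 _ (heapMin_mem e rest)
      exact Relation.ReflTransGen.tail (hS _ hm) hadj

lemma aloop_complete (corrupt : List (Int × Int)) (start end_ : Int × Int) :
    ∀ (q : List (Int × (Int × Int))) (cost : PySem.Dict (Int × Int) Int)
      (came : PySem.Dict (Int × Int) (Option (Int × Int))) (h : AInv start q cost),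
      (∀ k, cost.contains k = true →
        (∃ e ∈ q, e.2 = k) ∨ ∀ n ∈ adjacent k corrupt, cost.contains n = true) →
      (∀ k, (aloop corrupt start end_ q cost came h).contains k = true →
        ∀ n ∈ adjacent k corrupt,
          (aloop corrupt start end_ q cost came h).contains n = true) ∨
      (aloop corrupt start end_ q cost came h).contains end_ = true := by
  intro q cost came h
  induction q, cost, came, h using aloop.induct (corrupt := corrupt) (start := start) (end_ := end_) with
  | case1 cost came h _ =>
    intro hW
    left; intro k hk n hn
    rw [aloop] at hk ⊢
    rcases hW k hk with ⟨e', he', _⟩ | hcl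
    · simp at he'
    · exact hcl n hn
  | case2 cost came e rest h m hme _ =>
    intro _
    right
    have hme' : (heapMin e rest).2 = end_ := hme
    rw [aloop]; rw [if_pos hme']
    rw [← hme']
    exact h.2 _ (heapMin_mem e rest)
  | case3 cost came e rest h m q' hne r _ ih =>
    intro hW
    have hne' : ¬ (heapMin e rest).2 = end_ := hne
    rw [aloop]; rw [if_neg hne']
    refine ih ?_
    intro k hk
    by_cases hkm : k = (heapMin e rest).2
    · right
      intro n hn
      rw [hkm] at hn
      exact relaxFold_cover _ _ _ _ n hn
    · rcases relaxFold_new_has_entry _ _ _ _ _ hk with hold | hw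
      · rcases hW k hold with ⟨e', he', he2⟩ | hcl
        · left
          refine ⟨e', ?_, he2⟩
          apply relaxFold_front_mono
          have hne' : e' ≠ heapMin e rest := by
            intro heq; exact hkm (by rw [← he2, heq])
          exact (List.mem_erase_of_ne hne').mpr he'
        · right
          intro n hn
          exact relaxFold_mono _ _ _ _ _ (hcl n hn)
      · exact Or.inl hw

-- fold facts about bfsStep
lemma bfsFold_mono (l : List (Int × Int)) (s : PySem.Set (Int × Int) × List (Int × Int))
    (x : Int × Int) (hx : x ∈ s.1) : x ∈ (l.foldl bfsStep s).1 := by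
  induction l generalizing s with
  | nil => exact hx
  | cons n t ih =>
    simp only [List.foldl_cons]
    apply ih
    simp only [bfsStep]
    split_ifs with hc
    · exact hx
    · exact (PySem.Set.mem_add _ _ _).mpr (Or.inl hx)

lemma bfsFold_src (l : List (Int × Int)) (s : PySem.Set (Int × Int) × List (Int × Int))
    (x : Int × Int) (hx : x ∈ (l.foldl bfsStep s).1) : x ∈ s.1 ∨ x ∈ l := by
  induction l generalizing s with
  | nil => exact Or.inl hx
  | cons n t ih =>
    simp only [List.foldl_cons] at hx
    rcases ih _ hx with hstep | hmem
    · simp only [bfsStep] at hstep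
      split_ifs at hstep with hc
      · exact Or.inl hstep
      · rcases (PySem.Set.mem_add _ _ _).mp hstep with h | rfl
        · exact Or.inl h
        · exact Or.inr List.mem_cons_self
    · exact Or.inr (List.mem_cons_of_mem _ hmem)

lemma bfsFold_cover (l : List (Int × Int)) (s : PySem.Set (Int × Int) × List (Int × Int)) :
    ∀ n ∈ l, n ∈ (l.foldl bfsStep s).1 := by
  induction l generalizing s with
  | nil => intro n hn; simp at hn
  | cons n t ih =>
    intro x hx
    simp only [List.foldl_cons]
    rcases List.mem_cons.mp hx with rfl | hx'
    · apply bfsFold_mono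
      simp only [bfsStep]
      split_ifs with hc
      · exact (PySem.Set.contains_iff _ _).mp hc
      · exact (PySem.Set.mem_add _ _ _).mpr (Or.inr rfl)
    · exact ih _ x hx'

lemma bfsFold_pending_mono (l : List (Int × Int))
    (s : PySem.Set (Int × Int) × List (Int × Int))
    (p : Int × Int) (hp : p ∈ s.2) : p ∈ (l.foldl bfsStep s).2 := by
  induction l generalizing s with
  | nil => exact hp
  | cons n t ih =>
    simp only [List.foldl_cons]
    apply ih
    simp only [bfsStep]
    split_ifs with hc
    · exact hp
    · exact List.mem_append_left _ hp

lemma bfsFold_new_pending (l : List (Int × Int))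
    (s : PySem.Set (Int × Int) × List (Int × Int))
    (x : Int × Int) (hx : x ∈ (l.foldl bfsStep s).1) :
    x ∈ s.1 ∨ x ∈ (l.foldl bfsStep s).2 := by
  induction l generalizing s with
  | nil => exact Or.inl hx
  | cons n t ih =>
    simp only [List.foldl_cons] at hx ⊢
    rcases ih _ hx with hstep | hp
    · simp only [bfsStep] at hstep
      split_ifs at hstep with hc
      · exact Or.inl hstep
      · rcases (PySem.Set.mem_add _ _ _).mp hstep with h | rfl
        · exact Or.inl h
        · refine Or.inr ?_
          apply bfsFold_pending_mono
          simp only [bfsStep]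
          rw [if_neg hc]
          exact List.mem_append_right _ List.mem_cons_self
    · exact Or.inr hp

-- the BFS loop returns exactly the tiles reachable from start
lemma bloop_mono (corrupt : List (Int × Int)) (start : Int × Int) :
    ∀ (pending : List (Int × Int)) (visited : PySem.Set (Int × Int))
      (h : BInv start visited pending) (v : Int × Int), v ∈ visited →
      v ∈ bloop corrupt start pending visited h := by
  intro pending visited h
  induction pending, visited, h using bloop.induct (corrupt := corrupt) (start := start) with
  | case1 visited h _ =>
    intro v hv; rw [bloop]; exact hv
  | case2 visited c rest h r _ ih =>
    intro v hv
    rw [bloop]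
    exact ih v (bfsFold_mono _ _ _ hv)

lemma bloop_sound (corrupt : List (Int × Int)) (start : Int × Int) :
    ∀ (pending : List (Int × Int)) (visited : PySem.Set (Int × Int))
      (h : BInv start visited pending),
      (∀ v ∈ visited, Reach corrupt start v) →
      ∀ v ∈ bloop corrupt start pending visited h, Reach corrupt start v := by
  intro pending visited h
  induction pending, visited, h using bloop.induct (corrupt := corrupt) (start := start) with
  | case1 visited h _ =>
    intro hS v hv; rw [bloop] at hv; exact hS v hv
  | case2 visited c rest h r _ ih =>
    intro hS v hv
    rw [bloop] at hv
    refine ih ?_ v hv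
    intro v2 hv2
    rcases bfsFold_src _ _ _ hv2 with hold | hadj
    · exact hS v2 hold
    · have hc : c ∈ visited := h.2.2 c List.mem_cons_self
      exact Relation.ReflTransGen.tail (hS c hc) hadj

lemma bloop_complete (corrupt : List (Int × Int)) (start : Int × Int) :
    ∀ (pending : List (Int × Int)) (visited : PySem.Set (Int × Int))
      (h : BInv start visited pending),
      (∀ v ∈ visited, v ∈ pending ∨ ∀ n ∈ adjacent v corrupt, n ∈ visited) →
      ∀ v ∈ bloop corrupt start pending visited h,
        ∀ n ∈ adjacent v corrupt, n ∈ bloop corrupt start pending visited h := by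
  intro pending visited h
  induction pending, visited, h using bloop.induct (corrupt := corrupt) (start := start) with
  | case1 visited h _ =>
    intro hW v hv n hn
    rw [bloop] at hv ⊢
    rcases hW v hv with hp | hcl
    · simp at hp
    · exact hcl n hn
  | case2 visited c rest h r _ ih =>
    intro hW v hv n hn
    rw [bloop] at hv ⊢
    refine ih ?_ v hv n hn
    intro v2 hv2
    by_cases hvc : v2 = c
    · right
      intro n2 hn2
      rw [hvc] at hn2
      exact bfsFold_cover _ _ n2 hn2
    · rcases bfsFold_new_pending _ _ _ hv2 with hold | hp
      · rcases hW v2 hold with hp | hcl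
        · rcases List.mem_cons.mp hp with h' | h'
          · exact absurd h' hvc
          · exact Or.inl (bfsFold_pending_mono _ _ _ h')
        · right
          intro n2 hn2
          exact bfsFold_mono _ _ _ (hcl n2 hn2)
      · exact Or.inl hp

lemma adjacent_ofList (t : Int × Int) (ct : List (Int × Int)) :
    adjacent t (PySem.Set.ofList ct) = adjacent t ct := by
  simp only [adjacent]
  apply List.filter_congr
  intro p _
  have hc : List.contains (PySem.Set.ofList ct) p = List.contains ct p := by
    rw [Bool.eq_iff_iff, List.contains_iff_mem, List.contains_iff_mem, PySem.Set.mem_ofList]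
  rw [hc]

theorem search_iff_reach (ct : List (Int × Int)) (s e : Int × Int) :
    search ct s e = true ↔ Reach ct s e := by
  unfold search
  have hW0 : ∀ k, (PySem.Dict.empty.insert s (0 : Int)).contains k = true →
      (∃ e' ∈ [(manhattan s e, s)], e'.2 = k) ∨
        ∀ n ∈ adjacent k ct, (PySem.Dict.empty.insert s (0 : Int)).contains n = true := by
    intro k hk
    rw [PySem.Dict.contains_insert, PySem.Dict.contains_empty] at hk
    have hks : k = s := by simpa using hk
    exact Or.inl ⟨(manhattan s e, s), List.mem_cons_self, hks.symm⟩
  have hS0 : ∀ k, (PySem.Dict.empty.insert s (0 : Int)).contains k = true →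
      Reach ct s k := by
    intro k hk
    rw [PySem.Dict.contains_insert, PySem.Dict.contains_empty] at hk
    have hks : k = s := by simpa using hk
    rw [hks]
    exact Relation.ReflTransGen.refl
  constructor
  · intro hk
    exact aloop_sound ct s e _ _ _ _ hS0 e hk
  · intro hr
    have hstart := aloop_mono ct s e [(manhattan s e, s)]
      (PySem.Dict.empty.insert s 0) (PySem.Dict.empty.insert s none)
      (ainv_init s e) s (PySem.Dict.contains_insert_self _ _ _)
    have hcl := aloop_complete ct s e [(manhattan s e, s)]
      (PySem.Dict.empty.insert s 0) (PySem.Dict.empty.insert s none)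
      (ainv_init s e) hW0
    generalize hA : aloop ct s e [(manhattan s e, s)]
      (PySem.Dict.empty.insert s 0) (PySem.Dict.empty.insert s none)
      (ainv_init s e) = A at hstart hcl ⊢
    rcases hcl with hclosed | hend
    · clear hW0 hA
      induction hr with
      | refl => exact hstart
      | tail h1 h2 ih => exact hclosed _ ih _ h2
    · exact hend

theorem search_alt_iff_reach (ct : List (Int × Int)) (s e : Int × Int) :
    search_alt ct s e = true ↔ Reach ct s e := by
  unfold search_alt
  rw [PySem.Set.contains_iff]
  have hrel : Reach (PySem.Set.ofList ct) s e ↔ Reach ct s e := by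
    unfold Reach
    rw [show (fun a b => b ∈ adjacent a (PySem.Set.ofList ct)) =
        (fun a b => b ∈ adjacent a ct) from
      funext fun a => funext fun b => by rw [adjacent_ofList]]
  rw [← hrel]
  have hmem0 : ∀ v ∈ PySem.Set.ofList [s], v = s := by
    intro v hv
    rw [PySem.Set.mem_ofList] at hv
    simpa using hv
  have hW0 : ∀ v ∈ PySem.Set.ofList [s], v ∈ [s] ∨
      ∀ n ∈ adjacent v (PySem.Set.ofList ct), n ∈ PySem.Set.ofList [s] := by
    intro v hv
    exact Or.inl (by rw [hmem0 v hv]; exact List.mem_cons_self)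
  constructor
  · intro hm
    refine bloop_sound _ s _ _ _ ?_ e hm
    intro v hv
    rw [hmem0 v hv]
    exact Relation.ReflTransGen.refl
  · intro hr
    have hBI : BInv s (PySem.Set.ofList [s]) [s] :=
      ⟨PySem.Set.nodup_ofList _, fun v hv => Or.inl (hmem0 v hv),
       fun p hp => by
        simp only [List.mem_singleton] at hp
        rw [PySem.Set.mem_ofList]; simp [hp]⟩
    have hstart := bloop_mono (PySem.Set.ofList ct) s [s] (PySem.Set.ofList [s]) hBI
      s (by rw [PySem.Set.mem_ofList]; exact List.mem_cons_self)
    have hcl := bloop_complete (PySem.Set.ofList ct) s [s] (PySem.Set.ofList [s]) hBI hW0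
    generalize hA : bloop (PySem.Set.ofList ct) s [s] (PySem.Set.ofList [s]) _ = A
      at hstart hcl ⊢
    clear hA hW0 hmem0 hrel
    induction hr with
    | refl => exact hstart
    | tail h1 h2 ih => exact hcl _ ih _ h2

-- ===== VERDICT (by name: the statement is the Claim_ definition above) =====
theorem search_spec : Claim_equal_search := by
  intro ct s e _
  show search ct s e = search_alt ct s e
  by_cases h : Reach ct s e
  · rw [(search_iff_reach ct s e).mpr h, (search_alt_iff_reach ct s e).mpr h]
  · rw [Bool.eq_iff_iff] ; rw [search_iff_reach, search_alt_iff_reach]
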